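-- pv_equiv track=rewrite | github.com/rosed2/CourseProject | Code.py | assignTopics
-- ===== SOURCE A (Python) =====
-- import operator
--
-- def assignTopics(reviews, featureWords):
--     topicAssignments = []  # 2D array, a review has a topic assignment per sentence
--
--     for review in reviews:
--         assignments = []  # get a topic number per sentence
--
--         for sentence in review:
--             counter = {}  # counter dictionary, topic to feature word count
--             for i in range(len(featureWords)):
--                 counter[i] = 0
--
--             for word in sentence:
--                 for topic in range(len(featureWords)):
--                     topicFeatureWords = featureWords[topic]
--
--                     if word in topicFeatureWords:
--                         counter[topic] += 1
--
--             # assign topic number to the sentence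
--             topicNum = max(counter.items(), key=operator.itemgetter(1))[0]
--             assignments.append(topicNum)
--
--         topicAssignments.append(assignments)
--
--     return topicAssignments
-- ===== SOURCE B (Python) =====
-- def assignTopics(reviews, featureWords):
--     # Inverted index: word -> ascending list of distinct topic numbers containing it.
--     index = {}
--     for t, words in enumerate(featureWords):
--         for w in words:
--             ts = index.setdefault(w, [])
--             if not ts or ts[-1] != t:
--                 ts.append(t)
--     T = len(featureWords)
--     result = []
--     for review in reviews:
--         assignments = []
--         for sentence in review:
--             counts = [0] * T
--             for w in sentence:
--                 for t in index.get(w, ()):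
--                     counts[t] += 1
--             best = 0
--             for t in range(1, T):
--                 if counts[t] > counts[best]:
--                     best = t
--             assignments.append(best)
--         result.append(assignments)
--     return result
-- ===== Notes on version B (the rewrite author's own statement) =====
-- stated objective: faster
-- what changed: Replaces A's per-word scan over every topic's feature-word list with an inverted word-to-topics index built once, so each sentence word only increments the counters of topics actually containing it, and the per-sentence argmax becomes a linear scan over the counts array.
import Mathlib
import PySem

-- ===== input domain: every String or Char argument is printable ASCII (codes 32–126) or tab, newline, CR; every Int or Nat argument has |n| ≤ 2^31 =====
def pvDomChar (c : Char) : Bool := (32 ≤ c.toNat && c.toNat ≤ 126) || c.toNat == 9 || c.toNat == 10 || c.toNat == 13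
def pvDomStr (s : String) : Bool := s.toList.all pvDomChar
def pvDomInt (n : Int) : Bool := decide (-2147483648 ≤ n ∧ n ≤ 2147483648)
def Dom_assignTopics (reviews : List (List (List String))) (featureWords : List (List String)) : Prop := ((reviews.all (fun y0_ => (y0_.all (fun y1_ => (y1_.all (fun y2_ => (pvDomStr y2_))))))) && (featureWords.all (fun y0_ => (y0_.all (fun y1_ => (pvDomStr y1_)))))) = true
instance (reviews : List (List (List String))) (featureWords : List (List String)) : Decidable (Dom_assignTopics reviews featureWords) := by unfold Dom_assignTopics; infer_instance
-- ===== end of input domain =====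

-- B replaces A's per-word scan over every topic's word list by an inverted word→topics
-- index built once, so each sentence word only touches the topics that contain it (faster).
-- Pre_ excludes only the inputs where A raises ValueError (max of an empty dict).

-- ===== PORT A =====
-- A's per-sentence body, extracted as a helper: counter over all topics, then first argmax.
def pySentenceTopic (featureWords : List (List String)) (sentence : List String) : Int :=
  -- counter = {i: 0 for i in range(len(featureWords))}  (A's init loop)
  let counter0 : PySem.Dict Int Int :=
    (PySem.List.pyRange 0 (featureWords.length : Int) 1).foldl (fun d i => d.insert i 0) PySem.Dict.empty
  -- for word in sentence: for topic in range(len(featureWords)): if word in featureWords[topic]: counter[topic] += 1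
  -- featureWords[topic] ported as pyGetD (topic is always in range); counter[topic] += 1 as modify (key always present)
  let counter : PySem.Dict Int Int := sentence.foldl (fun d word =>
    (PySem.List.pyRange 0 (featureWords.length : Int) 1).foldl (fun d topic =>
      let topicFeatureWords := PySem.List.pyGetD featureWords topic []
      if topicFeatureWords.contains word then d.modify topic 0 (· + 1) else d) d) counter0
  -- max(counter.items(), key=itemgetter(1))[0]; Python raises ValueError on the empty dict — Pre_ excludes that case
  ((PySem.List.max? counter.items (fun p => p.2)).getD (0, 0)).1

def assignTopics (reviews : List (List (List String))) (featureWords : List (List String)) : List (List Int) :=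
  reviews.foldl (fun topicAssignments review =>
    topicAssignments ++ [review.foldl (fun assignments sentence =>
      assignments ++ [pySentenceTopic featureWords sentence]) []]) []

-- ===== PORT B =====
-- index.setdefault(w, []); if not ts or ts[-1] != t: ts.append(t)   (one step of the index build)
def pvIndexStep (d : PySem.Dict String (List Int)) (t : Int) (w : String) : PySem.Dict String (List Int) :=
  let ts := d.getD w []
  if ts = [] ∨ ts.getLast? ≠ some t then d.insert w (ts ++ [t]) else d

-- inverted index: word -> ascending list of distinct topic numbers containing it
def pvBuildIndex (featureWords : List (List String)) : PySem.Dict String (List Int) :=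
  (PySem.List.enumerate featureWords).foldl (fun d p => p.2.foldl (fun d w => pvIndexStep d p.1 w) d) PySem.Dict.empty

-- B's per-sentence body: counts over matched topics only, then the linear argmax scan
def altSentenceTopic (index : PySem.Dict String (List Int)) (T : Nat) (sentence : List String) : Int :=
  -- counts = [0]*T; for w in sentence: for t in index.get(w, ()): counts[t] += 1
  -- counts[t] += 1 ported with set/pyGetD; t is always in range 0..T-1
  let counts : List Int := sentence.foldl (fun counts w =>
    (index.getD w []).foldl (fun counts t =>
      counts.set t.toNat (PySem.List.pyGetD counts t 0 + 1)) counts) (List.replicate T (0 : Int))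
  -- best = 0; for t in range(1, T): if counts[t] > counts[best]: best = t
  (PySem.List.pyRange 1 (T : Int) 1).foldl (fun best t =>
    if PySem.List.pyGetD counts t 0 > PySem.List.pyGetD counts best 0 then t else best) 0

def assignTopics_alt (reviews : List (List (List String))) (featureWords : List (List String)) : List (List Int) :=
  let index := pvBuildIndex featureWords
  reviews.foldl (fun result review =>
    result ++ [review.foldl (fun assignments sentence =>
      assignments ++ [altSentenceTopic index featureWords.length sentence]) []]) []

-- ===== PRECONDITION & SPEC =====
-- Pre_ excludes exactly the inputs where A raises ValueError: featureWords == [] while some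
-- review has a sentence (then max() is taken over an empty dict).
def Pre_assignTopics (reviews : List (List (List String))) (featureWords : List (List String)) : Prop :=
  featureWords ≠ [] ∨ reviews.all (fun r => r.isEmpty) = true
instance (reviews : List (List (List String))) (featureWords : List (List String)) : Decidable (Pre_assignTopics reviews featureWords) := by unfold Pre_assignTopics; infer_instance

def pvWitness_assignTopics : List (List (List String)) × List (List String) :=
  ([[["big", "nice"], ["cheap"]]], [["nice", "good"], ["cheap"]])

def Spec_assignTopics (reviews : List (List (List String))) (featureWords : List (List String)) (out : List (List Int)) : Prop := out = assignTopics_alt reviews featureWords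
instance (reviews : List (List (List String))) (featureWords : List (List String)) (out : List (List Int)) : Decidable (Spec_assignTopics reviews featureWords out) := by unfold Spec_assignTopics; infer_instance

-- ===== CLAIM (what is proved, stated in full; the proofs are below) =====
def Claim_equal_assignTopics : Prop := ∀ (reviews : List (List (List String))) (featureWords : List (List String)), Dom_assignTopics reviews featureWords → Pre_assignTopics reviews featureWords → Spec_assignTopics reviews featureWords (assignTopics reviews featureWords)

-- ===== LEMMAS AND PROOFS =====

-- number of words of the sentence lying in topic i's feature-word list (the common count)
def pvCnt (featureWords : List (List String)) (sentence : List String) (i : Nat) : Int :=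
  (sentence.countP (fun w => (featureWords.getD i []).contains w) : Int)

-- B's argmax scan, abstracted over the lookup function
def pvBest (g : Int → Int) (T : Nat) : Int :=
  (PySem.List.pyRange 1 (T : Int) 1).foldl (fun best t => if g best < g t then t else best) 0

-- ---- A side ----

lemma innerFold_keys (P : Int → Bool) (L : List Int) :
    ∀ (d : PySem.Dict Int Int), (∀ x ∈ L, x ∈ d.keys) →
    (L.foldl (fun d topic => if P topic then d.modify topic 0 (· + 1) else d) d).keys = d.keys := by
  induction L with
  | nil => intro d _; rfl
  | cons a L ih =>
    intro d h
    have hka : (if P a then d.modify a 0 (· + 1) else d).keys = d.keys := by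
      split
      · rw [PySem.Dict.keys_modify]
        exact PySem.Dict.keys_insert_of_contains d _ ((PySem.Dict.contains_iff_mem_keys d a).2 (h a (by simp)))
      · rfl
    simp only [List.foldl_cons]
    rw [ih _ (fun x hx => by rw [hka]; exact h x (by simp [hx])), hka]

lemma innerFold_getD (P : Int → Bool) (L : List Int) (hL : L.Nodup) :
    ∀ (d : PySem.Dict Int Int) (t : Int),
    (L.foldl (fun d topic => if P topic then d.modify topic 0 (· + 1) else d) d).getD t 0
      = d.getD t 0 + (if t ∈ L ∧ P t = true then 1 else 0) := by
  induction L with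
  | nil => intro d t; simp
  | cons a L ih =>
    intro d t
    simp only [List.foldl_cons]
    rw [ih ((List.nodup_cons.1 hL).2)]
    by_cases hta : t = a
    · subst hta
      have hnm : t ∉ L := (List.nodup_cons.1 hL).1
      by_cases hp : P t = true
      · simp [hp, PySem.Dict.getD_modify_self, hnm]
      · simp [hp, hnm]
    · have : (if P a then d.modify a 0 (· + 1) else d).getD t 0 = d.getD t 0 := by
        split
        · exact PySem.Dict.getD_modify_of_ne d 0 _ hta
        · rfl
      rw [this]
      simp [hta]

lemma pyRange_zero_cast (T : Nat) :
    PySem.List.pyRange 0 (T : Int) 1 = (List.range T).map (fun i : Nat => (i : Int)) := by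
  exact PySem.List.pyRange_zero_natCast T

lemma pyRange_zero_nodup (T : Nat) : (PySem.List.pyRange 0 (T : Int) 1).Nodup := by
  rw [pyRange_zero_cast]
  exact List.nodup_range.map (fun a b h => by exact_mod_cast h)

lemma wordFold_keys (fw : List (List String)) (ws : List String) :
    ∀ (d : PySem.Dict Int Int), d.keys = (List.range fw.length).map (fun i : Nat => (i : Int)) →
    (ws.foldl (fun d word =>
      (PySem.List.pyRange 0 (fw.length : Int) 1).foldl (fun d topic =>
        if (PySem.List.pyGetD fw topic []).contains word then d.modify topic 0 (· + 1) else d) d) d).keys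
      = (List.range fw.length).map (fun i : Nat => (i : Int)) := by
  induction ws with
  | nil => intro d h; exact h
  | cons w ws ih =>
    intro d h
    simp only [List.foldl_cons]
    apply ih
    rw [innerFold_keys _ _ d (fun x hx => by rw [h, ← pyRange_zero_cast]; exact hx)]
    exact h

lemma wordFold_getD (fw : List (List String)) (ws : List String) :
    ∀ (d : PySem.Dict Int Int), d.keys = (List.range fw.length).map (fun i : Nat => (i : Int)) →
    ∀ i : Nat, i < fw.length →
    (ws.foldl (fun d word =>
      (PySem.List.pyRange 0 (fw.length : Int) 1).foldl (fun d topic =>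
        if (PySem.List.pyGetD fw topic []).contains word then d.modify topic 0 (· + 1) else d) d) d).getD (i : Int) 0
      = d.getD (i : Int) 0 + pvCnt fw ws i := by
  induction ws with
  | nil => intro d h i hi; simp [pvCnt]
  | cons w ws ih =>
    intro d h i hi
    simp only [List.foldl_cons]
    rw [ih _ (by rw [innerFold_keys _ _ d (fun x hx => by rw [h, ← pyRange_zero_cast]; exact hx)]; exact h) i hi]
    rw [innerFold_getD _ _ (pyRange_zero_nodup fw.length) d (i : Int)]
    have hmem : ((i : Int) ∈ PySem.List.pyRange 0 (fw.length : Int) 1) := by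
      rw [PySem.List.mem_pyRange_one]
      constructor
      · exact Int.natCast_nonneg i
      · exact_mod_cast hi
    have hgd : PySem.List.pyGetD fw (i : Int) [] = fw.getD i [] := PySem.List.pyGetD_natCast fw i []
    simp [pvCnt, List.countP_cons, hmem, hgd]
    split_ifs <;> ring

-- ---- B side: the inverted index ----

lemma indexStep_getD (d : PySem.Dict String (List Int)) (t : Int) (u w : String) (x : Int) :
    (x ∈ (pvIndexStep d t u).getD w [] ↔ x ∈ d.getD w [] ∨ (x = t ∧ w = u)) := by
  simp only [pvIndexStep]
  split
  · rw [PySem.Dict.getD_insert]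
    by_cases hwu : w = u
    · subst hwu
      simp [List.mem_append]
    · simp [hwu]
  · rename_i hcond
    push_neg at hcond
    have ht : t ∈ d.getD u [] := List.mem_of_getLast? hcond.2
    by_cases hwu : w = u
    · subst hwu
      constructor
      · tauto
      · rintro (hx | ⟨rfl, _⟩)
        · exact hx
        · exact ht
    · simp [hwu]

lemma wordsFold_mem (t : Int) (ws : List String) :
    ∀ (d : PySem.Dict String (List Int)) (w : String) (x : Int),
    x ∈ (ws.foldl (fun d w => pvIndexStep d t w) d).getD w [] ↔
      x ∈ d.getD w [] ∨ (x = t ∧ w ∈ ws) := by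
  induction ws with
  | nil => intro d w x; simp
  | cons u ws ih =>
    intro d w x
    simp only [List.foldl_cons]
    rw [ih]
    rw [indexStep_getD]
    simp [List.mem_cons]
    tauto

lemma build_mem (fws : List (List String)) :
    ∀ (s : Int) (d : PySem.Dict String (List Int)) (w : String) (x : Int),
    x ∈ ((PySem.List.enumerate fws s).foldl (fun d p => p.2.foldl (fun d w => pvIndexStep d p.1 w) d) d).getD w [] ↔
      x ∈ d.getD w [] ∨ ∃ i, i < fws.length ∧ x = s + (i : Int) ∧ w ∈ fws.getD i [] := by
  induction fws with
  | nil => intro s d w x; simp [PySem.List.enumerate]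
  | cons v fws ih =>
    intro s d w x
    simp only [PySem.List.enumerate, List.foldl_cons]
    rw [ih]
    rw [wordsFold_mem]
    constructor
    · rintro ((hx | ⟨rfl, hw⟩) | ⟨i, hi, rfl, hw⟩)
      · exact Or.inl hx
      · exact Or.inr ⟨0, by simp, by simp, by simpa using hw⟩
      · refine Or.inr ⟨i + 1, by simpa using hi, by push_cast; ring, by simpa using hw⟩
    · rintro (hx | ⟨i, hi, rfl, hw⟩)
      · exact Or.inl (Or.inl hx)
      · cases i with
        | zero => exact Or.inl (Or.inr ⟨by simp, by simpa using hw⟩)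
        | succ j =>
          refine Or.inr ⟨j, by simp [List.length_cons] at hi; omega, by push_cast; ring, by simpa using hw⟩

lemma indexStep_inv (d : PySem.Dict String (List Int)) (t : Int) (u : String)
    (h : ∀ w, List.IsChain (· < ·) (d.getD w []) ∧ ∀ x ∈ d.getD w [], x ≤ t) :
    ∀ w, List.IsChain (· < ·) ((pvIndexStep d t u).getD w []) ∧ ∀ x ∈ (pvIndexStep d t u).getD w [], x ≤ t := by
  intro w
  simp only [pvIndexStep]
  split
  · rename_i hcond
    rw [PySem.Dict.getD_insert]
    by_cases hwu : w = u
    · subst hwu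
      rw [if_pos rfl]
      refine ⟨List.IsChain.append (h w).1 (by simp) ?_, ?_⟩
      · intro a ha b hb
        simp only [List.head?_cons, Option.mem_def, Option.some.injEq] at hb
        subst hb
        have ha' : a ∈ d.getD w [] := List.mem_of_getLast? ha
        have h1 : a ≤ t := (h w).2 a ha'
        rcases hcond with hnil | hlast
        · simp [hnil] at ha'
        · have : a ≠ t := by
            intro hat
            subst hat
            exact hlast ha
          omega
      · intro x hx
        rcases List.mem_append.1 hx with hx | hx
        · exact (h w).2 x hx
        · simp at hx; omega
    · simp only [if_neg hwu]
      exact h w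
  · exact h w

lemma wordsFold_inv (t : Int) (ws : List String) :
    ∀ (d : PySem.Dict String (List Int)),
    (∀ w, List.IsChain (· < ·) (d.getD w []) ∧ ∀ x ∈ d.getD w [], x ≤ t) →
    ∀ w, List.IsChain (· < ·) ((ws.foldl (fun d w => pvIndexStep d t w) d).getD w []) ∧
         ∀ x ∈ (ws.foldl (fun d w => pvIndexStep d t w) d).getD w [], x ≤ t := by
  induction ws with
  | nil => intro d h; exact h
  | cons u ws ih =>
    intro d h
    simp only [List.foldl_cons]
    exact ih _ (indexStep_inv d t u h)

lemma build_inv (fws : List (List String)) :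
    ∀ (s : Int) (d : PySem.Dict String (List Int)),
    (∀ w, List.IsChain (· < ·) (d.getD w []) ∧ ∀ x ∈ d.getD w [], x < s) →
    ∀ w, List.IsChain (· < ·) (((PySem.List.enumerate fws s).foldl (fun d p => p.2.foldl (fun d w => pvIndexStep d p.1 w) d) d).getD w []) := by
  induction fws with
  | nil => intro s d h w; exact (h w).1
  | cons v fws ih =>
    intro s d h w
    simp only [PySem.List.enumerate, List.foldl_cons]
    apply ih (s + 1)
    intro w'
    have h1 := wordsFold_inv s v d (fun w'' => ⟨(h w'').1, fun x hx => le_of_lt ((h w'').2 x hx)⟩) w'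
    exact ⟨h1.1, fun x hx => by have := h1.2 x hx; omega⟩

lemma index_mem (fws : List (List String)) (w : String) (x : Int) :
    x ∈ (pvBuildIndex fws).getD w [] ↔ ∃ i, i < fws.length ∧ x = (i : Int) ∧ w ∈ fws.getD i [] := by
  unfold pvBuildIndex
  rw [build_mem fws 0 PySem.Dict.empty w x]
  simp [PySem.Dict.getD_empty]

lemma index_nodup (fws : List (List String)) (w : String) : ((pvBuildIndex fws).getD w []).Nodup := by
  have hch : List.IsChain (· < ·) ((pvBuildIndex fws).getD w []) := by
    unfold pvBuildIndex
    exact build_inv fws 0 PySem.Dict.empty (fun w' => by simp [PySem.Dict.getD_empty]) w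
  exact (List.isChain_iff_pairwise.1 hch).imp (fun h => ne_of_lt h)

-- ---- B side: the counts ----

lemma set_map_range (T : Nat) (f : Nat → Int) (a : Int) (ha : 0 ≤ a) (haT : a < (T : Int)) :
    (((List.range T).map f).set a.toNat (PySem.List.pyGetD ((List.range T).map f) a 0 + 1))
      = (List.range T).map (fun i : Nat => if (i : Int) = a then f i + 1 else f i) := by
  have hlt : a.toNat < T := by omega
  have hget : PySem.List.pyGetD ((List.range T).map f) a 0 = f a.toNat := by
    rw [PySem.List.pyGetD_of_nonneg _ _ ha]
    exact PySem.List.getD_map_range f T a.toNat 0 hlt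
  rw [hget]
  apply List.ext_getElem
  · simp
  · intro j h1 h2
    simp only [List.getElem_set, List.getElem_map, List.getElem_range]
    have hj : j < T := by simpa using h2
    by_cases hja : a.toNat = j
    · subst hja
      simp [show ((a.toNat : Int) = a) from by omega]
    · rw [if_neg hja, if_neg (by omega)]

lemma tsFold_counts (T : Nat) (ts : List Int) (hnd : ts.Nodup) (hb : ∀ x ∈ ts, 0 ≤ x ∧ x < (T : Int)) :
    ∀ (f : Nat → Int),
    (ts.foldl (fun counts t => counts.set t.toNat (PySem.List.pyGetD counts t 0 + 1)) ((List.range T).map f))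
      = (List.range T).map (fun i : Nat => f i + if ((i : Int) ∈ ts) then 1 else 0) := by
  induction ts with
  | nil => intro f; simp
  | cons a ts ih =>
    intro f
    have ha := hb a (by simp)
    simp only [List.foldl_cons]
    rw [set_map_range T f a ha.1 ha.2]
    rw [ih (List.nodup_cons.1 hnd).2 (fun x hx => hb x (by simp [hx]))]
    apply List.map_congr_left
    intro i hi
    have hna : a ∉ ts := (List.nodup_cons.1 hnd).1
    by_cases hia : (i : Int) = a
    · simp [hia, hna]
    · simp [hia, List.mem_cons]

lemma sentFold_counts (fws : List (List String)) (s : List String) :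
    ∀ (f : Nat → Int),
    (s.foldl (fun counts w =>
      ((pvBuildIndex fws).getD w []).foldl (fun counts t =>
        counts.set t.toNat (PySem.List.pyGetD counts t 0 + 1)) counts) ((List.range fws.length).map f))
      = (List.range fws.length).map (fun i => f i + pvCnt fws s i) := by
  induction s with
  | nil => intro f; simp [pvCnt]
  | cons w s ih =>
    intro f
    simp only [List.foldl_cons]
    have hnd := index_nodup fws w
    have hb : ∀ x ∈ (pvBuildIndex fws).getD w [], 0 ≤ x ∧ x < (fws.length : Int) := by
      intro x hx
      rcases (index_mem fws w x).1 hx with ⟨i, hi, rfl, _⟩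
      constructor
      · exact Int.natCast_nonneg i
      · exact_mod_cast hi
    rw [tsFold_counts fws.length _ hnd hb f]
    rw [ih]
    apply List.map_congr_left
    intro i hi
    have hiT : i < fws.length := List.mem_range.1 hi
    have hmem : ((i : Int) ∈ (pvBuildIndex fws).getD w []) ↔ w ∈ fws.getD i [] := by
      rw [index_mem]
      constructor
      · rintro ⟨j, hj, hij, hw⟩
        have : i = j := by exact_mod_cast hij
        subst this
        exact hw
      · intro hw
        exact ⟨i, hiT, rfl, hw⟩
    simp only [pvCnt, List.countP_cons]
    simp [hmem, List.getD]
    split_ifs <;> omega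

-- ---- argmax ----

lemma argmax_lemma (g : Int → Int) :
    ∀ T : Nat, 1 ≤ T →
    PySem.List.max? ((List.range T).map (fun i : Nat => ((i : Int), g i))) (fun p => p.2)
        = some (pvBest g T, g (pvBest g T)) ∧ 0 ≤ pvBest g T ∧ pvBest g T < (T : Int) := by
  intro T hT
  induction T, hT using Nat.le_induction with
  | base =>
    have hr : PySem.List.pyRange 1 ((1 : Nat) : Int) 1 = [] := by decide
    have hbest : pvBest g 1 = 0 := by rw [pvBest, hr]; rfl
    refine ⟨?_, by rw [hbest], by rw [hbest]; norm_num⟩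
    rw [hbest]
    simp [List.range_one, PySem.List.max?]
  | succ T hT ih =>
    obtain ⟨ih1, ih2, ih3⟩ := ih
    have hb : pvBest g (T + 1) = if g (pvBest g T) < g ((T : Nat) : Int) then ((T : Nat) : Int) else pvBest g T := by
      rw [pvBest, pvBest]
      have hstep : PySem.List.pyRange 1 (((T + 1 : Nat)) : Int) 1 = PySem.List.pyRange 1 ((T : Nat) : Int) 1 ++ [((T : Nat) : Int)] := by
        have h1 : (((T + 1 : Nat)) : Int) = ((T : Nat) : Int) + 1 := by push_cast; ring
        rw [h1]
        exact PySem.List.pyRange_one_succ_right (by exact_mod_cast hT)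
      rw [hstep, List.foldl_append]
      rfl
    constructor
    · rw [List.range_succ, List.map_append]
      simp only [PySem.List.max?] at ih1 ⊢
      rw [List.foldl_append, ih1]
      simp only [List.map_cons, List.map_nil, List.foldl_cons, List.foldl_nil]
      rw [hb]
      split_ifs with hlt
      · simp
      · simp
    · rw [hb]
      split_ifs with hlt
      · constructor
        · exact Int.natCast_nonneg T
        · push_cast; omega
      · constructor
        · exact ih2
        · push_cast; omega

-- ---- assembling the per-sentence equality ----

lemma sentence_eq (fws : List (List String)) (h : fws ≠ []) (s : List String) :
    pySentenceTopic fws s = altSentenceTopic (pvBuildIndex fws) fws.length s := by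
  have hT : 1 ≤ fws.length := List.length_pos_of_ne_nil h
  have hcast_nodup : ((List.range fws.length).map (fun i : Nat => (i : Int))).Nodup := by
    rw [← pyRange_zero_cast]; exact pyRange_zero_nodup fws.length
  -- A's initial counter: items are [(0,0),…,(T-1,0)]
  have hitems0 : (((PySem.List.pyRange 0 (fws.length : Int) 1).foldl (fun d i => d.insert i 0) (PySem.Dict.empty : PySem.Dict Int Int))).items
      = (List.range fws.length).map (fun i : Nat => ((i : Int), (0 : Int))) := by
    rw [pyRange_zero_cast]
    have h2 := PySem.Dict.items_foldl_insert_fresh (κ := Int) (ν := Int)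
      ((List.range fws.length).map (fun i : Nat => (i : Int))) (fun i => i) (fun _ => (0 : Int))
      PySem.Dict.empty (fun a _ => PySem.Dict.contains_empty a) (by simpa using hcast_nodup)
    simpa [List.map_map, Function.comp] using h2
  have hkeys0 : (((PySem.List.pyRange 0 (fws.length : Int) 1).foldl (fun d i => d.insert i 0) (PySem.Dict.empty : PySem.Dict Int Int))).keys
      = (List.range fws.length).map (fun i : Nat => (i : Int)) := by
    show (((PySem.List.pyRange 0 (fws.length : Int) 1).foldl (fun d i => d.insert i 0) (PySem.Dict.empty : PySem.Dict Int Int))).items.map (·.1)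
      = (List.range fws.length).map (fun i : Nat => (i : Int))
    rw [hitems0, List.map_map]
    rfl
  have hgetD0 : ∀ i : Nat, i < fws.length →
      (((PySem.List.pyRange 0 (fws.length : Int) 1).foldl (fun d i => d.insert i 0) (PySem.Dict.empty : PySem.Dict Int Int))).getD (i : Int) 0 = 0 := by
    intro i hi
    apply PySem.Dict.getD_of_mem_items
    · rw [hitems0]
      exact List.mem_map.2 ⟨i, List.mem_range.2 hi, rfl⟩
    · rw [hkeys0]; exact hcast_nodup
  -- A's final counter
  simp only [pySentenceTopic, altSentenceTopic]
  set cD : PySem.Dict Int Int := s.foldl (fun d word =>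
      (PySem.List.pyRange 0 (fws.length : Int) 1).foldl (fun d topic =>
        if (PySem.List.pyGetD fws topic []).contains word then d.modify topic 0 (· + 1) else d) d)
      ((PySem.List.pyRange 0 (fws.length : Int) 1).foldl (fun d i => d.insert i 0) PySem.Dict.empty) with hcD
  have hkeysF : cD.keys = (List.range fws.length).map (fun i : Nat => (i : Int)) :=
    wordFold_keys fws s _ hkeys0
  have hgetDF : ∀ i : Nat, i < fws.length → cD.getD (i : Int) 0 = pvCnt fws s i := by
    intro i hi
    rw [hcD, wordFold_getD fws s _ hkeys0 i hi, hgetD0 i hi, zero_add]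
  have hitemsF : cD.items = (List.range fws.length).map (fun i : Nat => ((i : Int), pvCnt fws s i)) := by
    rw [PySem.Dict.items_eq_map_keys cD (by rw [hkeysF]; exact hcast_nodup) 0, hkeysF, List.map_map]
    apply List.map_congr_left
    intro i hi
    simp [hgetDF i (List.mem_range.1 hi)]
  -- B's counts
  have hrepl : List.replicate fws.length (0 : Int) = (List.range fws.length).map (fun _ : Nat => (0 : Int)) := by
    simp [List.map_const']
  set counts := s.foldl (fun counts w =>
      ((pvBuildIndex fws).getD w []).foldl (fun counts t =>
        counts.set t.toNat (PySem.List.pyGetD counts t 0 + 1)) counts) (List.replicate fws.length (0 : Int)) with hcounts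
  have hcountsF : counts = (List.range fws.length).map (fun i => pvCnt fws s i) := by
    rw [hcounts, hrepl, sentFold_counts fws s (fun _ => 0)]
    simp
  -- the lookup function B scans with
  have hg : ∀ i : Nat, i < fws.length → PySem.List.pyGetD counts (i : Int) 0 = pvCnt fws s i := by
    intro i hi
    rw [hcountsF, PySem.List.pyGetD_natCast]
    exact PySem.List.getD_map_range _ _ _ _ hi
  have hitemsF' : cD.items = (List.range fws.length).map
      (fun i : Nat => ((i : Int), PySem.List.pyGetD counts (i : Int) 0)) := by
    rw [hitemsF]
    exact List.map_congr_left (fun i hi => by rw [hg i (List.mem_range.1 hi)])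
  have harg := argmax_lemma (fun t => PySem.List.pyGetD counts t 0) fws.length hT
  rw [hitemsF', harg.1]
  simp only [Option.getD_some]
  show pvBest (fun t => PySem.List.pyGetD counts t 0) fws.length = _
  rw [pvBest]

-- ===== VERDICT (by name: the statement is the Claim_ definition above) =====
theorem assignTopics_spec : Claim_equal_assignTopics := by
  intro reviews fws _ hPre
  unfold Spec_assignTopics assignTopics assignTopics_alt
  simp only [PySem.List.foldl_append_singleton_eq_map, List.nil_append]
  rcases hPre with h | h
  · exact List.map_congr_left (fun r _ =>
      List.map_congr_left (fun s _ => sentence_eq fws h s))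
  · apply List.map_congr_left
    intro r hr
    have hre : r = [] := List.isEmpty_iff.1 (by
      have := List.all_eq_true.1 h r hr
      simpa using this)
    subst hre
    rfl
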